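-- pv_equiv track=rewrite | github.com/zoedolan/Vybn | 2024/From_the_Edge/ancestral_code_weaver.py | process_improvement_suggestion
-- ===== SOURCE A (Python) =====
-- import string
--
-- def process_improvement_suggestion(suggestion):
--     tokens = suggestion.split()
--     clean_tokens = []
--     stopwords = {"the", "and", "of", "to", "a", "in", "for", "on", "with", "that", "this", "it", "is", "at", "by", "will", "be", "an", "as","from","or"}
--     for t in tokens:
--         t_stripped = t.strip(string.punctuation).lower()
--         if t_stripped and t_stripped not in stopwords and len(t_stripped) > 3:
--             clean_tokens.append(t_stripped)
--     if clean_tokens: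
--         chosen = max(clean_tokens, key=len)
--         return chosen
--     return None
-- ===== SOURCE B (Python) =====
-- import string
--
-- def process_improvement_suggestion(suggestion):
--     stopwords = {"the", "and", "of", "to", "a", "in", "for", "on", "with", "that", "this", "it", "is", "at", "by", "will", "be", "an", "as", "from", "or"}
--     best = None
--     for t in suggestion.split():
--         t_stripped = t.strip(string.punctuation).lower()
--         if t_stripped and t_stripped not in stopwords and len(t_stripped) > 3:
--             if best is None or len(t_stripped) > len(best):
--                 best = t_stripped
--     return best
-- ===== Notes on version B (the rewrite author's own statement) =====
-- stated objective: simpler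
-- what changed: Single pass with an Option best-accumulator: the filter and the max selection are folded into one traversal, eliminating the intermediate clean_tokens list and the separate max(key=len) pass; a strictly-longer update keeps the earliest longest token, matching max's tie-breaking.
import Mathlib
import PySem

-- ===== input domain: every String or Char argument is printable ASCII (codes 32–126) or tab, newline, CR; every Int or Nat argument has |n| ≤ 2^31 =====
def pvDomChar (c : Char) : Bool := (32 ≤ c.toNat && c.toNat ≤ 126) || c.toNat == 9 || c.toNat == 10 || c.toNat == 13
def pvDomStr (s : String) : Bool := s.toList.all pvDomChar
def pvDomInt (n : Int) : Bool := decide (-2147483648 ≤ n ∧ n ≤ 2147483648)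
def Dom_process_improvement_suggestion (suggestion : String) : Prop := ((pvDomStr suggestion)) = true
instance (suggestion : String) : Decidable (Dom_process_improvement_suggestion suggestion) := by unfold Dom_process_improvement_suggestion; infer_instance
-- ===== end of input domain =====

-- B replaces A's "build clean_tokens, then max(key=len)" with a single pass keeping an
-- Option best-accumulator updated only on strictly longer tokens (first longest wins, as in A); objective: simpler.

-- shared helpers: string.punctuation, the stopword set, and the per-token strip/filter
-- (both Pythons compute exactly this on each token)
def pvPunct : String := "!\"#$%&'()*+,-./:;<=>?@[\\]^_`{|}~"

def pvStopwords : PySem.Set String :=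
  PySem.Set.ofList ["the", "and", "of", "to", "a", "in", "for", "on", "with", "that",
    "this", "it", "is", "at", "by", "will", "be", "an", "as", "from", "or"]

-- t.strip(string.punctuation).lower()
def pvStripLow (t : String) : String := PySem.Str.lower (PySem.Str.stripChars t pvPunct)

-- "t_stripped and t_stripped not in stopwords and len(t_stripped) > 3"
def pvKeepB (ts : String) : Bool :=
  !(ts == "") && !(PySem.Set.contains pvStopwords ts) && decide (PySem.Str.len ts > 3)

-- ===== PORT A =====
def process_improvement_suggestion (suggestion : String) : Option String :=
  let tokens := PySem.Str.split₀ suggestion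
  let clean_tokens := tokens.foldl (fun acc t =>
    let t_stripped := pvStripLow t
    if pvKeepB t_stripped then acc ++ [t_stripped] else acc) []
  if clean_tokens ≠ [] then PySem.List.max? clean_tokens PySem.Str.len else none

-- ===== PORT B =====
def process_improvement_suggestion_alt (suggestion : String) : Option String :=
  (PySem.Str.split₀ suggestion).foldl (fun best t =>
    let t_stripped := pvStripLow t
    if pvKeepB t_stripped then
      match best with
      | none => some t_stripped
      | some b => if PySem.Str.len t_stripped > PySem.Str.len b then some t_stripped else some b
    else best) none

-- ===== PRECONDITION & SPEC =====
def Spec_process_improvement_suggestion (suggestion : String) (out : Option String) : Prop := out = process_improvement_suggestion_alt suggestion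
instance (suggestion : String) (out : Option String) : Decidable (Spec_process_improvement_suggestion suggestion out) := by unfold Spec_process_improvement_suggestion; infer_instance

-- ===== CLAIM (what is proved, stated in full; the proofs are below) =====
def Claim_equal_process_improvement_suggestion : Prop := ∀ (suggestion : String), Dom_process_improvement_suggestion suggestion → Spec_process_improvement_suggestion suggestion (process_improvement_suggestion suggestion)

-- ===== LEMMAS AND PROOFS =====

-- the max?/running-best fold step (PySem.List.max? is exactly a foldl of this step from none)
def pvMStep (acc : Option String) (x : String) : Option String :=
  match acc with
  | none => some x
  | some m => if PySem.Str.len m < PySem.Str.len x then some x else some m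

-- A's clean_tokens accumulator, as a function of the remaining tokens
def pvClean (ts : List String) (acc : List String) : List String :=
  ts.foldl (fun acc t => if pvKeepB (pvStripLow t) then acc ++ [pvStripLow t] else acc) acc

-- the two loop bodies, rewritten without lets / inline match
theorem pvAFun_eq : (fun (acc : List String) (t : String) =>
      let t_stripped := pvStripLow t
      if pvKeepB t_stripped then acc ++ [t_stripped] else acc)
    = (fun acc t => if pvKeepB (pvStripLow t) then acc ++ [pvStripLow t] else acc) := rfl

theorem pvBFun_eq : (fun (best : Option String) (t : String) =>
      let t_stripped := pvStripLow t
      if pvKeepB t_stripped then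
        match best with
        | none => some t_stripped
        | some b => if PySem.Str.len t_stripped > PySem.Str.len b then some t_stripped else some b
      else best)
    = (fun best t => if pvKeepB (pvStripLow t) then pvMStep best (pvStripLow t) else best) := by
  funext best t
  by_cases h : pvKeepB (pvStripLow t) = true
  · show (if pvKeepB (pvStripLow t) then _ else _) = _
    rw [if_pos h, if_pos h]
    cases best <;> rfl
  · show (if pvKeepB (pvStripLow t) then _ else _) = _
    rw [if_neg h, if_neg h]

theorem pvClean_cons (t : String) (ts : List String) (acc : List String) :
    pvClean (t :: ts) acc
      = pvClean ts (if pvKeepB (pvStripLow t) then acc ++ [pvStripLow t] else acc) := by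
  simp only [pvClean, List.foldl_cons]

theorem pvClean_acc (ts : List String) (acc : List String) :
    pvClean ts acc = acc ++ pvClean ts [] := by
  induction ts generalizing acc with
  | nil => simp [pvClean]
  | cons t ts ih =>
    rw [pvClean_cons, pvClean_cons]
    by_cases h : pvKeepB (pvStripLow t) = true
    · rw [if_pos h, if_pos h, ih, ih ([] ++ [pvStripLow t])]; simp
    · rw [if_neg h, if_neg h, ih]

-- B's fold over tokens equals the max?-step fold over A's clean list, for any accumulator
theorem pvFold_eq (ts : List String) (best : Option String) :
    ts.foldl (fun best t => if pvKeepB (pvStripLow t) then pvMStep best (pvStripLow t) else best)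
        best
    = (pvClean ts []).foldl pvMStep best := by
  induction ts generalizing best with
  | nil => simp [pvClean]
  | cons t ts ih =>
    rw [List.foldl_cons, pvClean_cons, ih]
    by_cases h : pvKeepB (pvStripLow t) = true
    · rw [if_pos h, if_pos h, pvClean_acc ts ([] ++ [pvStripLow t])]
      simp only [List.nil_append, List.foldl_append, List.foldl_cons, List.foldl_nil]
    · rw [if_neg h, if_neg h]

theorem pvMax?_eq_foldl (l : List String) :
    PySem.List.max? l PySem.Str.len = l.foldl pvMStep none := by
  unfold PySem.List.max?
  congr 1
  funext acc x
  cases acc <;> rfl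

-- ===== VERDICT (by name: the statement is the Claim_ definition above) =====
theorem process_improvement_suggestion_spec : Claim_equal_process_improvement_suggestion := by
  intro suggestion _
  show (if (PySem.Str.split₀ suggestion).foldl (fun acc t =>
        let t_stripped := pvStripLow t
        if pvKeepB t_stripped then acc ++ [t_stripped] else acc) [] ≠ [] then
      PySem.List.max? ((PySem.Str.split₀ suggestion).foldl (fun acc t =>
        let t_stripped := pvStripLow t
        if pvKeepB t_stripped then acc ++ [t_stripped] else acc) []) PySem.Str.len
    else none)
    = (PySem.Str.split₀ suggestion).foldl (fun best t =>
        let t_stripped := pvStripLow t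
        if pvKeepB t_stripped then
          match best with
          | none => some t_stripped
          | some b => if PySem.Str.len t_stripped > PySem.Str.len b then some t_stripped
              else some b
        else best) none
  rw [pvAFun_eq, pvBFun_eq, pvFold_eq,
    show (PySem.Str.split₀ suggestion).foldl
        (fun acc t => if pvKeepB (pvStripLow t) then acc ++ [pvStripLow t] else acc) []
      = pvClean (PySem.Str.split₀ suggestion) [] from rfl,
    pvMax?_eq_foldl]
  by_cases h : pvClean (PySem.Str.split₀ suggestion) [] = []
  · simp [h]
  · simp [h]
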